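-- pv_equiv track=rewrite | github.com/JStephens72/StaticSiteGenerator | src/markdown_blocks.py | is_heading_block
-- ===== SOURCE A (Python) =====
-- def is_heading_block(block):
--     if len(block.split('\n')) > 1:
--         return False
--
--     index = 0
--     count = 0
--     while index < len(block) and block[index] == '#':
--         index += 1
--         count += 1
--
--     if count == 0 or count > 6:
--         return False
--     elif index < len(block) and block[index] == ' ':
--         return True
--     else:
--         return False
-- ===== SOURCE B (Python) =====
-- def is_heading_block(block):
--     if '\n' in block:
--         return False
--     return any(block.startswith('#' * n + ' ') for n in range(1, 7))
-- ===== Notes on version B (the rewrite author's own statement) =====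
-- stated objective: idiomatic
-- what changed: Replaces the manual index/count hash-scanning loop and its three-way branch with a newline membership test plus an any() over the six candidate heading prefixes via startswith.
import Mathlib
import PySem

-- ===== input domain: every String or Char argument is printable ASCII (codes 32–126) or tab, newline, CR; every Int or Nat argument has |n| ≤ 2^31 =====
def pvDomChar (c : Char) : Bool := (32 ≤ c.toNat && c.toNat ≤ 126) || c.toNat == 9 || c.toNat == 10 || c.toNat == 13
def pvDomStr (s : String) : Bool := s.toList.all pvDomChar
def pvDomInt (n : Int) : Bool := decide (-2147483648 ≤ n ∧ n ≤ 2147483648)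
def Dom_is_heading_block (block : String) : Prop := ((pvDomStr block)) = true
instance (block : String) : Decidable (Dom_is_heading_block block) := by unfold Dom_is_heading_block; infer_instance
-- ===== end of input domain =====

-- B replaces A's manual hash-counting loop with an any() over the six literal heading prefixes (idiomatic, same behaviour).

-- ===== PORT A =====
-- the while loop of A: advances index/count over leading '#'
def pvHashLoop (cs : List Char) (index count : Nat) : Nat × Nat :=
  if h : index < cs.length ∧ PySem.List.pyGet? cs (index : Int) = some '#' then
    pvHashLoop cs (index + 1) (count + 1)
  else (index, count)
termination_by cs.length - index
decreasing_by omega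

def is_heading_block (block : String) : Bool :=
  let cs := block.toList
  if (PySem.Chars.splitOn cs ['\n']).length > 1 then false
  else
    let ic := pvHashLoop cs 0 0
    if ic.2 = 0 ∨ ic.2 > 6 then false
    else if ic.1 < cs.length ∧ PySem.List.pyGet? cs (ic.1 : Int) = some ' ' then true
    else false

-- ===== PORT B =====
def is_heading_block_alt (block : String) : Bool :=
  if PySem.Chars.isIn ['\n'] block.toList then false
  else (PySem.List.pyRange 1 7 1).any fun n =>
    PySem.Chars.startswith block.toList (List.replicate n.toNat '#' ++ [' '])

-- ===== PRECONDITION & SPEC =====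
def Spec_is_heading_block (block : String) (out : Bool) : Prop := out = is_heading_block_alt block
instance (block : String) (out : Bool) : Decidable (Spec_is_heading_block block out) := by unfold Spec_is_heading_block; infer_instance

-- ===== CLAIM (what is proved, stated in full; the proofs are below) =====
def Claim_equal_is_heading_block : Prop := ∀ (block : String), Dom_is_heading_block block → Spec_is_heading_block block (is_heading_block block)

-- ===== LEMMAS AND PROOFS =====

-- splitOn.go on a single-char separator: result length = acc.length + 1 + count of the char
theorem pv_splitOn_go_len (sep : Char) : ∀ (fuel : Nat) (l cur : List Char) (acc : List (List Char)),
    l.length ≤ fuel →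
    (PySem.Chars.splitOn.go [sep] fuel l cur acc).length = acc.length + 1 + l.count sep := by
  intro fuel
  induction fuel with
  | zero =>
    intro l cur acc h
    have : l = [] := List.length_eq_zero_iff.mp (Nat.le_zero.mp h)
    subst this
    simp [PySem.Chars.splitOn.go]
  | succ n ih =>
    intro l cur acc h
    cases l with
    | nil => simp [PySem.Chars.splitOn.go]
    | cons c rest =>
      by_cases hc : c = sep
      · subst hc
        have hpre : [c].isPrefixOf (c :: rest) = true := by simp [List.isPrefixOf]
        rw [PySem.Chars.splitOn.go]
        simp only [hpre, if_true, List.length_cons, List.length_nil, List.length_singleton,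
          List.drop_succ_cons, List.drop_zero]
        rw [ih rest [] (cur.reverse :: acc) (by simpa using Nat.le_of_succ_le_succ h)]
        simp [List.count_cons]
        omega
      · have hpre : [sep].isPrefixOf (c :: rest) = false := by
          simp [List.isPrefixOf]
          exact fun hh => (hc hh.symm).elim
        rw [PySem.Chars.splitOn.go]
        simp only [hpre, Bool.false_eq_true, if_false]
        rw [ih rest (c :: cur) acc (by simpa using Nat.le_of_succ_le_succ h)]
        simp [hc]

theorem pv_splitOn_len (cs : List Char) (sep : Char) :
    (PySem.Chars.splitOn cs [sep]).length = 1 + cs.count sep := by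
  unfold PySem.Chars.splitOn
  rw [pv_splitOn_go_len sep (cs.length + 1) cs [] [] (by omega)]
  simp

-- the hash loop adds the length of the leading run of '#' in (cs.drop index) to both components
theorem pv_hashLoop_eq : ∀ (cs : List Char) (i c : Nat),
    pvHashLoop cs i c = (i + ((cs.drop i).takeWhile (fun x => x == '#')).length,
                         c + ((cs.drop i).takeWhile (fun x => x == '#')).length) := by
  intro cs i c
  fun_induction pvHashLoop cs i c with
  | case1 i c h ih =>
    obtain ⟨hlt, hget⟩ := h
    have hg : cs[i]? = some '#' := by
      simpa [PySem.List.pyGet?_natCast] using hget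
    have hdrop : cs.drop i = '#' :: cs.drop (i + 1) := by
      obtain ⟨hh, he⟩ := List.getElem?_eq_some_iff.mp hg
      rw [List.drop_eq_getElem_cons hlt, he]
    rw [ih, hdrop]
    rw [List.takeWhile_cons_of_pos (by decide)]
    simp only [List.length_cons, Prod.mk.injEq]
    omega
  | case2 i c h =>
    by_cases hlt : i < cs.length
    · have hget : ¬ PySem.List.pyGet? cs (i : Int) = some '#' := fun hh => h ⟨hlt, hh⟩
      have hg : cs[i]? ≠ some '#' := by
        simpa [PySem.List.pyGet?_natCast] using hget
      have hne : (cs[i] == '#') = false := by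
        rw [beq_eq_false_iff_ne]
        intro hh
        exact hg (List.getElem?_eq_some_iff.mpr ⟨hlt, hh⟩)
      rw [List.drop_eq_getElem_cons hlt]
      simp [hne]
    · have : cs.drop i = [] := List.drop_eq_nil_of_le (by omega)
      simp [this]

-- characterization of the six-prefix test
theorem pv_prefix_iff : ∀ (cs : List Char) (n : Nat),
    ((List.replicate n '#' ++ [' ']) <+: cs) ↔
      ((cs.takeWhile (fun x => x == '#')).length = n ∧ cs[n]? = some ' ') := by
  intro cs
  induction cs with
  | nil =>
    intro n
    constructor
    · intro h
      have := h.length_le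
      simp at this
    · intro ⟨_, h2⟩
      simp at h2
  | cons c rest ih =>
    intro n
    cases n with
    | zero =>
      simp only [List.replicate_zero, List.nil_append, List.cons_prefix_cons, List.nil_prefix,
        and_true, List.getElem?_cons_zero, Option.some.injEq]
      constructor
      · intro hcc
        subst hcc
        rw [List.takeWhile_cons_of_neg (by decide)]
        simp
      · rintro ⟨h1, rfl⟩
        rfl
    | succ m =>
      rw [show List.replicate (m + 1) '#' ++ [' '] = '#' :: (List.replicate m '#' ++ [' ']) from
        by simp [List.replicate_succ]]
      rw [List.cons_prefix_cons, ih m]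
      constructor
      · rintro ⟨hcc, h1, h2⟩
        subst hcc
        refine ⟨?_, by simpa using h2⟩
        simp [h1]
      · intro ⟨h1, h2⟩
        by_cases hc : (c == '#') = true
        · have hc' : c = '#' := by simpa using hc
          subst hc'
          simp only [List.takeWhile_cons, beq_self_eq_true, if_true, List.length_cons,
            Nat.add_right_cancel_iff] at h1
          exact ⟨rfl, h1, by simpa using h2⟩
        · exfalso
          have hcf : (c == '#') = false := by simpa using hc
          simp [hcf] at h1

-- count of a char is positive iff the singleton is an infix
theorem pv_isIn_singleton (cs : List Char) (a : Char) :
    PySem.Chars.isIn [a] cs = true ↔ 0 < cs.count a := by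
  rw [PySem.Chars.isIn_iff_infix]
  constructor
  · intro h
    refine List.count_pos_iff.mpr ?_
    obtain ⟨s, t, hst⟩ := h
    subst hst
    simp
  · intro h
    obtain ⟨s, t, hst⟩ := List.append_of_mem (List.count_pos_iff.mp h)
    exact ⟨s, t, by simp [hst]⟩

-- ===== VERDICT (by name: the statement is the Claim_ definition above) =====
theorem is_heading_block_spec : Claim_equal_is_heading_block := by
  intro block _
  unfold Spec_is_heading_block is_heading_block is_heading_block_alt
  dsimp only
  set cs := block.toList with hcs
  rw [pv_splitOn_len cs '\n']
  by_cases hnl : 0 < cs.count '\n'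
  · rw [if_pos (show 1 + cs.count '\n' > 1 by omega),
        if_pos ((pv_isIn_singleton cs '\n').mpr hnl)]
  · have hIn : ¬ PySem.Chars.isIn ['\n'] cs = true :=
      fun h => hnl ((pv_isIn_singleton cs '\n').mp h)
    rw [if_neg (show ¬ 1 + cs.count '\n' > 1 by omega), if_neg hIn]
    rw [pv_hashLoop_eq cs 0 0]
    simp only [List.drop_zero, Nat.zero_add]
    set k := (cs.takeWhile (fun x => x == '#')).length with hk
    have hrange : PySem.List.pyRange 1 7 1 = [1, 2, 3, 4, 5, 6] := by decide
    rw [hrange]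
    by_cases hkr : 1 ≤ k ∧ k ≤ 6
    · rw [if_neg (show ¬ (k = 0 ∨ k > 6) by omega)]
      by_cases hsp : cs[k]? = some ' '
      · have hklen : k < cs.length := (List.getElem?_eq_some_iff.mp hsp).1
        rw [if_pos (show k < cs.length ∧ PySem.List.pyGet? cs (k : Int) = some ' ' from
          ⟨hklen, by simpa [PySem.List.pyGet?_natCast] using hsp⟩)]
        have hsw : PySem.Chars.startswith cs (List.replicate k '#' ++ [' ']) = true := by
          rw [PySem.Chars.startswith_iff]
          exact (pv_prefix_iff cs k).mpr ⟨rfl, hsp⟩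
        symm
        rw [List.any_eq_true]
        refine ⟨(k : Int), ?_, by simpa using hsw⟩
        obtain ⟨hk1, hk6⟩ := hkr
        interval_cases k <;> decide
      · rw [if_neg (show ¬ (k < cs.length ∧ PySem.List.pyGet? cs (k : Int) = some ' ') from
          fun hh => hsp (by simpa [PySem.List.pyGet?_natCast] using hh.2))]
        symm
        rw [List.any_eq_false]
        intro n hn
        intro hstart
        rw [PySem.Chars.startswith_iff, pv_prefix_iff] at hstart
        obtain ⟨h1, h2⟩ := hstart
        have hnk : n.toNat = k := by rw [hk]; exact h1.symm
        exact hsp (hnk ▸ h2)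
    · rw [if_pos (show k = 0 ∨ k > 6 by omega)]
      symm
      rw [List.any_eq_false]
      intro n hn
      intro hstart
      rw [PySem.Chars.startswith_iff, pv_prefix_iff] at hstart
      obtain ⟨h1, h2⟩ := hstart
      have hnk : n.toNat = k := by rw [hk]; exact h1.symm
      have hn' : 1 ≤ n.toNat ∧ n.toNat ≤ 6 := by fin_cases hn <;> simp
      omega
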